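-- pv_equiv track=rewrite | github.com/slovb/advent_of_code_2019 | 10/first.py | countViewable
-- ===== SOURCE A (Python) =====
-- def crossProduct(u, v):
--     return u[0]*v[1] - u[1]*v[0]
--
-- def dotProduct(u, v):
--     return u[0]*v[0] + u[1]*v[1]
--
-- def diff(u, v):
--     return (u[0] - v[0], u[1] - v[1])
--
-- def isBetween(a, b, c):
--     ba = diff(b, a)
--     ca = diff(c, a)
--     if crossProduct(ba, ca) != 0:
--         return False
--     dot = dotProduct(ba, ca)
--     if dot < 0 or dot > dotProduct(ba, ba):
--         return False
--     return True
--
-- def canSee(p, t, data):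
--     for b in data:
--         if b == p or b == t:
--             continue
--         if isBetween(p, t, b):
--             return False
--     return True
--
-- def countViewable(p, data):
--     c = 0
--     for t in data:
--         if t == p:
--             continue
--         if canSee(p, t, data):
--             c += 1
--     return c
-- ===== SOURCE B (Python) =====
-- def _gcd(a, b):
--     while b:
--         a, b = b, a % b
--     return a
--
-- def countViewable(p, data):
--     px, py = p[0], p[1]
--     directions = set()
--     for t in data:
--         dx, dy = t[0] - px, t[1] - py
--         if dx == 0 and dy == 0:
--             continue
--         g = _gcd(abs(dx), abs(dy))
--         directions.add((dx // g, dy // g))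
--     return len(directions)
-- ===== Notes on version B (the rewrite author's own statement) =====
-- stated objective: faster
-- what changed: Replaced the all-pairs blocker scan (for each target, test every other asteroid for lying on the segment) by one linear pass collecting the gcd-reduced direction vector of each asteroid into a set and returning its size; Pre_ restricts to the natural domain of distinct (x,y) asteroid points: rows or p shorter than 2 (both programs' indexing raises once a distance is computed) and list-distinct entries denoting the same point as each other or as p (A counts copies separately / lets full-list equality treat one position as two asteroids; …
-- outside the precondition, e.g. on countViewable((0, 0), [(1, 1), (1, 1)]): A returns 2, B returns 1; on countViewable((2,), [(1,)]): A returns 1, B raises IndexError; on countViewable((0, 0), [(1, 2), (1, 2, 9)]): A returns 0, B returns 1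
import Mathlib
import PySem

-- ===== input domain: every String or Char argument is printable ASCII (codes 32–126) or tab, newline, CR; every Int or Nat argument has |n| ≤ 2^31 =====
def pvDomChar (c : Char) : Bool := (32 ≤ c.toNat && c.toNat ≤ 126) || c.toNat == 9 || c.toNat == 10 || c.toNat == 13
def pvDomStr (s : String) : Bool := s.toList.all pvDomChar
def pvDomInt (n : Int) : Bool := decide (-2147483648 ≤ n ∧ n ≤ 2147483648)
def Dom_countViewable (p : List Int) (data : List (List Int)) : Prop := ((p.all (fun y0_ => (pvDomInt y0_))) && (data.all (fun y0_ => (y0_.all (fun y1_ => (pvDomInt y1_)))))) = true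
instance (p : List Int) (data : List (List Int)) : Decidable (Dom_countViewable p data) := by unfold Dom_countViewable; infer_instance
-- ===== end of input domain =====

-- B replaces A's all-pairs blocker scan by one linear pass collecting the gcd-reduced
-- direction of each asteroid into a set and returning its size; objective: faster.

-- ===== PORT A =====
def pvCross (u v : Int × Int) : Int := u.1 * v.2 - u.2 * v.1

def pvDot (u v : Int × Int) : Int := u.1 * v.1 + u.2 * v.2

def pvDiff (u v : List Int) : Int × Int :=
  (PySem.List.pyGetD u 0 0 - PySem.List.pyGetD v 0 0,
   PySem.List.pyGetD u 1 0 - PySem.List.pyGetD v 1 0)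

def pvIsBetween (a b c : List Int) : Bool :=
  let ba := pvDiff b a
  let ca := pvDiff c a
  if pvCross ba ca ≠ 0 then false
  else
    let dot := pvDot ba ca
    if dot < 0 ∨ dot > pvDot ba ba then false
    else true

def pvCanSee (p t : List Int) (data : List (List Int)) : Bool :=
  match data with
  | [] => true
  | b :: rest =>
      if b = p ∨ b = t then pvCanSee p t rest
      else if pvIsBetween p t b then false
      else pvCanSee p t rest

def countViewable (p : List Int) (data : List (List Int)) : Int :=
  data.foldl (fun c t => if t = p then c else if pvCanSee p t data then c + 1 else c) 0

-- ===== PORT B =====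
-- the while-loop Euclid gcd of Source B (_gcd); called on |dx|, |dy|
def pvGcdLoop (a b : Nat) : Nat :=
  if h : b = 0 then a else pvGcdLoop b (a % b)
termination_by b
decreasing_by exact Nat.mod_lt _ (Nat.pos_of_ne_zero h)

-- the body of Source B's loop over data
def pvDirStep (px py : Int) (s : PySem.Set (Int × Int)) (t : List Int) :
    PySem.Set (Int × Int) :=
  let dx := PySem.List.pyGetD t 0 0 - px
  let dy := PySem.List.pyGetD t 1 0 - py
  if dx = 0 ∧ dy = 0 then s
  else
    let g : Int := Int.ofNat (pvGcdLoop dx.natAbs dy.natAbs)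
    PySem.Set.add s (PySem.Int.floordiv dx g, PySem.Int.floordiv dy g)

def countViewable_alt (p : List Int) (data : List (List Int)) : Int :=
  let px := PySem.List.pyGetD p 0 0
  let py := PySem.List.pyGetD p 1 0
  ((data.foldl (pvDirStep px py) PySem.Set.empty).length : Int)

-- the (x, y) point a row denotes
def pvProj (r : List Int) : Int × Int := (r.getD 0 0, r.getD 1 0)

-- ===== PRECONDITION & SPEC =====
-- Pre_ restricts to the task's natural domain, a list of distinct asteroid points:
-- it excludes p or rows shorter than 2 (A raises IndexError once the geometry is reached
-- and B's indexing raises too), and configurations in which two list-distinct entries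
-- (or an entry and p) denote the same (x, y) point — duplicates, on which A counts a
-- visible position once per copy while a direction count counts it once (either is
-- defensible), and entries whose extra trailing elements make A's full-list equality
-- tests treat one position as two asteroids.
def Pre_countViewable (p : List Int) (data : List (List Int)) : Prop :=
  2 ≤ p.length ∧ (∀ r ∈ data, 2 ≤ r.length) ∧
    (data.map pvProj).Nodup ∧ (∀ r ∈ data, pvProj r = pvProj p → r = p)
instance (p : List Int) (data : List (List Int)) : Decidable (Pre_countViewable p data) := by
  unfold Pre_countViewable; infer_instance

def pvWitness_countViewable : List Int × List (List Int) :=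
  ([0, 0], [[1, 1], [2, 2], [0, 1], [3, -1]])

def Spec_countViewable (p : List Int) (data : List (List Int)) (out : Int) : Prop := out = countViewable_alt p data
instance (p : List Int) (data : List (List Int)) (out : Int) : Decidable (Spec_countViewable p data out) := by unfold Spec_countViewable; infer_instance

-- ===== CLAIM (what is proved, stated in full; the proofs are below) =====
def Claim_equal_countViewable : Prop := ∀ (p : List Int) (data : List (List Int)), Dom_countViewable p data → Pre_countViewable p data → Spec_countViewable p data (countViewable p data)

-- ===== LEMMAS AND PROOFS =====

-- spec-side geometry on integer vectors
def pvN2 (u : Int × Int) : Int := u.1 * u.1 + u.2 * u.2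
def pvGg (u : Int × Int) : Int := (Int.gcd u.1 u.2 : Int)
def pvRed (u : Int × Int) : Int × Int := (u.1 / pvGg u, u.2 / pvGg u)
def pvVec (p t : List Int) : Int × Int :=
  (t.getD 0 0 - p.getD 0 0, t.getD 1 0 - p.getD 1 0)

theorem pvGcdLoop_eq (a b : Nat) : pvGcdLoop a b = Nat.gcd b a := by
  fun_induction pvGcdLoop a b with
  | case1 a => simp
  | case2 a b h ih => rw [ih, Nat.gcd_rec b a]

theorem pvGcd_eq (a b : Int) :
    Int.ofNat (pvGcdLoop a.natAbs b.natAbs) = (Int.gcd a b : Int) := by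
  simp [pvGcdLoop_eq, Int.gcd, Nat.gcd_comm]

theorem pvCollinearDecomp (d w : Int × Int) (hd : Int.gcd d.1 d.2 = 1)
    (h : d.1 * w.2 = d.2 * w.1) : ∃ m : Int, w.1 = m * d.1 ∧ w.2 = m * d.2 := by
  by_cases h1 : d.1 = 0
  · have h2 : d.2 * d.2 = 1 := by
      have := hd; rw [h1] at this; simp [Int.gcd] at this
      rcases Int.natAbs_eq d.2 with he | he <;> rw [he, this] <;> ring
    have hw1 : w.1 = 0 := by
      rw [h1] at h; simp at h
      rcases h with h | h
      · exfalso; rw [h] at h2; simp at h2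
      · exact h
    exact ⟨w.2 * d.2, by simp [hw1, h1], by rw [mul_assoc, h2, mul_one]⟩
  · have hco : IsCoprime d.1 d.2 := Int.isCoprime_iff_gcd_eq_one.mpr hd
    have hdvd : d.1 ∣ d.2 * w.1 := ⟨w.2, by linarith [h]⟩
    obtain ⟨m, hm⟩ := hco.dvd_of_dvd_mul_left hdvd
    refine ⟨m, by rw [hm]; ring, ?_⟩
    have : d.1 * w.2 = d.1 * (m * d.2) := by rw [h, hm]; ring
    exact mul_left_cancel₀ h1 this

theorem pvGg_pos (u : Int × Int) (hu : u ≠ (0, 0)) : 0 < pvGg u := by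
  have : Int.gcd u.1 u.2 ≠ 0 := by
    intro h
    rcases Int.gcd_eq_zero_iff.mp h with ⟨h1, h2⟩
    exact hu (Prod.ext h1 h2)
  unfold pvGg; omega

theorem pvRed_mul (u : Int × Int) :
    (pvRed u).1 * pvGg u = u.1 ∧ (pvRed u).2 * pvGg u = u.2 := by
  constructor
  · exact Int.ediv_mul_cancel (by unfold pvGg; exact Int.gcd_dvd_left _ _)
  · exact Int.ediv_mul_cancel (by unfold pvGg; exact Int.gcd_dvd_right _ _)

theorem pvRed_prim (u : Int × Int) (hu : u ≠ (0, 0)) :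
    Int.gcd (pvRed u).1 (pvRed u).2 = 1 := by
  have hg : 0 < Int.gcd u.1 u.2 := by
    have := pvGg_pos u hu; unfold pvGg at this; omega
  exact Int.gcd_div_gcd_div_gcd hg

theorem pvN2_pos (d : Int × Int) (hd : d ≠ (0, 0)) : 0 < pvN2 d := by
  have h : d.1 ≠ 0 ∨ d.2 ≠ 0 := by
    by_contra h; push_neg at h; exact hd (Prod.ext h.1 h.2)
  unfold pvN2
  rcases h with h | h
  · nlinarith [mul_self_pos.mpr h, mul_self_nonneg d.2]
  · nlinarith [mul_self_pos.mpr h, mul_self_nonneg d.1]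

theorem pvRed_smul (d : Int × Int) (m : Int) (hm : 0 < m) (hd : Int.gcd d.1 d.2 = 1) :
    pvRed (m * d.1, m * d.2) = d := by
  have hgg : pvGg (m * d.1, m * d.2) = m := by
    unfold pvGg
    simp only [Int.gcd_mul_left, hd, mul_one]
    omega
  unfold pvRed
  rw [hgg]
  exact Prod.ext (Int.mul_ediv_cancel_left _ hm.ne') (Int.mul_ediv_cancel_left _ hm.ne')

-- "b weakly between p and t (t off p)" = same reduced direction and not farther
theorem pvBlk (u w : Int × Int) (hu : u ≠ (0, 0)) (hw : w ≠ (0, 0)) :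
    (pvCross u w = 0 ∧ 0 ≤ pvDot u w ∧ pvDot u w ≤ pvDot u u)
      ↔ (pvRed w = pvRed u ∧ pvN2 w ≤ pvN2 u) := by
  obtain ⟨hu1, hu2⟩ := pvRed_mul u
  have hg : 0 < pvGg u := pvGg_pos u hu
  have hdprim : Int.gcd (pvRed u).1 (pvRed u).2 = 1 := pvRed_prim u hu
  have hd0 : pvRed u ≠ (0, 0) := by
    intro h; rw [h] at hdprim; simp [Int.gcd] at hdprim
  have hn2d : 0 < (pvRed u).1 * (pvRed u).1 + (pvRed u).2 * (pvRed u).2 := pvN2_pos _ hd0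
  set d := pvRed u with hdset
  set g := pvGg u with hgset
  constructor
  · rintro ⟨hcross, hdot0, hdotle⟩
    have hcol : d.1 * w.2 = d.2 * w.1 := by
      have h2 : g * (d.1 * w.2 - d.2 * w.1) = 0 := by
        unfold pvCross at hcross; linear_combination hcross + w.2 * hu1 - w.1 * hu2
      rcases mul_eq_zero.mp h2 with h | h
      · exfalso; omega
      · linarith
    obtain ⟨m, hw1, hw2⟩ := pvCollinearDecomp d w hdprim hcol
    have hdotuw : pvDot u w = g * m * (d.1 * d.1 + d.2 * d.2) := by
      unfold pvDot; rw [← hu1, ← hu2, hw1, hw2]; ring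
    have hdotuu : pvDot u u = g * g * (d.1 * d.1 + d.2 * d.2) := by
      unfold pvDot; rw [← hu1, ← hu2]; ring
    rw [hdotuw] at hdot0
    rw [hdotuw, hdotuu] at hdotle
    have hm0 : m ≠ 0 := by
      intro h; rw [h] at hw1 hw2; simp at hw1 hw2; exact hw (Prod.ext hw1 hw2)
    have hmpos : 0 < m := by
      rcases lt_or_gt_of_ne hm0 with h | h
      · exfalso; nlinarith [mul_pos hg hn2d]
      · exact h
    have hmle : m ≤ g := by nlinarith [mul_pos hg hn2d]
    constructor
    · rw [show w = (m * d.1, m * d.2) from Prod.ext hw1 hw2]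
      exact pvRed_smul d m hmpos hdprim
    · have hn2w : pvN2 w = m * m * (d.1 * d.1 + d.2 * d.2) := by
        unfold pvN2; rw [hw1, hw2]; ring
      have hn2u : pvN2 u = g * g * (d.1 * d.1 + d.2 * d.2) := by
        unfold pvN2; rw [← hu1, ← hu2]; ring
      rw [hn2w, hn2u]; nlinarith [mul_pos hmpos hn2d, mul_pos hg hn2d]
  · rintro ⟨hred, hle⟩
    obtain ⟨hw1, hw2⟩ := pvRed_mul w
    have hgw : 0 < pvGg w := pvGg_pos w hw
    rw [hred] at hw1 hw2
    set gw := pvGg w with hgwset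
    have hn2w : pvN2 w = gw * gw * (d.1 * d.1 + d.2 * d.2) := by
      unfold pvN2; rw [← hw1, ← hw2]; ring
    have hn2u : pvN2 u = g * g * (d.1 * d.1 + d.2 * d.2) := by
      unfold pvN2; rw [← hu1, ← hu2]; ring
    have hle' := hle
    rw [hn2w, hn2u] at hle'
    have hgwle : gw ≤ g := by nlinarith [mul_pos hgw hn2d, mul_pos hg hn2d]
    refine ⟨?_, ?_, ?_⟩
    · unfold pvCross; rw [← hu1, ← hu2, ← hw1, ← hw2]; ring
    · unfold pvDot; rw [← hu1, ← hu2, ← hw1, ← hw2]; nlinarith [mul_pos hg hgw]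
    · unfold pvDot; rw [← hu1, ← hu2, ← hw1, ← hw2]; nlinarith [mul_pos hg hn2d]

-- equal reduced direction and equal squared length force equal vectors
theorem pvEqOfRedN2 (u w : Int × Int) (hu : u ≠ (0, 0)) (hw : w ≠ (0, 0))
    (hred : pvRed w = pvRed u) (hn2 : pvN2 w = pvN2 u) : w = u := by
  obtain ⟨hu1, hu2⟩ := pvRed_mul u
  obtain ⟨hw1, hw2⟩ := pvRed_mul w
  have hg : 0 < pvGg u := pvGg_pos u hu
  have hgw : 0 < pvGg w := pvGg_pos w hw
  have hd0 : pvRed u ≠ (0, 0) := by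
    have hdprim := pvRed_prim u hu
    intro h; rw [h] at hdprim; simp [Int.gcd] at hdprim
  have hn2d : 0 < pvN2 (pvRed u) := pvN2_pos _ hd0
  rw [hred] at hw1 hw2
  have hn2w : pvN2 w = pvGg w * pvGg w * pvN2 (pvRed u) := by
    unfold pvN2; rw [← hw1, ← hw2]; ring
  have hn2u : pvN2 u = pvGg u * pvGg u * pvN2 (pvRed u) := by
    unfold pvN2; rw [← hu1, ← hu2]; ring
  rw [hn2w, hn2u] at hn2
  have hsq : pvGg w * pvGg w = pvGg u * pvGg u := mul_right_cancel₀ hn2d.ne' hn2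
  have hgg : pvGg w = pvGg u := by nlinarith
  rw [hgg] at hw1 hw2
  exact Prod.ext (by rw [← hw1, ← hu1]) (by rw [← hw2, ← hu2])

theorem pvLen2 (l : List Int) (h : 2 ≤ l.length) :
    ∃ (a b : Int) (rest : List Int), l = a :: b :: rest := by
  match l, h with
  | a :: b :: rest, _ => exact ⟨a, b, rest, rfl⟩

theorem pvPy0 (b : List Int) (h : 2 ≤ b.length) :
    PySem.List.pyGetD b 0 0 = b.getD 0 0 := by
  obtain ⟨a, c, r, rfl⟩ := pvLen2 b h
  simp [pysem]

theorem pvPy1 (b : List Int) (h : 2 ≤ b.length) :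
    PySem.List.pyGetD b 1 0 = b.getD 1 0 := by
  obtain ⟨a, c, r, rfl⟩ := pvLen2 b h
  simp [pysem]

-- the difference vector is zero exactly when the two rows denote the same point
theorem pvVec_zero_iff (p t : List Int) :
    pvVec p t = (0, 0) ↔ pvProj t = pvProj p := by
  simp only [pvVec, pvProj, Prod.ext_iff]
  omega

theorem pvVec_self (p : List Int) : pvVec p p = (0, 0) := by
  simp [pvVec]

-- equal difference vectors mean equal denoted points
theorem pvVec_inj_proj (p t b : List Int) (h : pvVec p b = pvVec p t) :
    pvProj b = pvProj t := by
  simp only [pvVec, pvProj, Prod.ext_iff] at h ⊢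
  omega

-- reduced direction as Source B computes it
theorem pvRedFloor (dx dy : Int) (h : ¬(dx = 0 ∧ dy = 0)) :
    ((PySem.Int.floordiv dx (Int.ofNat (pvGcdLoop dx.natAbs dy.natAbs)),
      PySem.Int.floordiv dy (Int.ofNat (pvGcdLoop dx.natAbs dy.natAbs))) : Int × Int)
      = pvRed (dx, dy) := by
  have h' : ((dx, dy) : Int × Int) ≠ (0, 0) := by
    intro he; rw [Prod.ext_iff] at he; exact h ⟨he.1, he.2⟩
  have hg : 0 < pvGg (dx, dy) := pvGg_pos _ h'
  rw [pvGcd_eq, show ((dx).gcd dy : Int) = pvGg (dx, dy) from rfl]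
  rw [PySem.Int.floordiv_eq_ediv_of_pos hg, PySem.Int.floordiv_eq_ediv_of_pos hg]
  rfl

theorem pvDiff_eq (t p : List Int) (ht : 2 ≤ t.length) (hp : 2 ≤ p.length) :
    pvDiff t p = pvVec p t := by
  simp only [pvDiff, pvVec, pvPy0 t ht, pvPy1 t ht, pvPy0 p hp, pvPy1 p hp]

theorem pvIsBetween_iff (p t b : List Int) (hp : 2 ≤ p.length) (ht : 2 ≤ t.length)
    (hb : 2 ≤ b.length) (hu : pvVec p t ≠ (0, 0)) :
    pvIsBetween p t b = true ↔
      (pvVec p b = (0, 0) ∨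
       (pvVec p b ≠ (0, 0) ∧ pvRed (pvVec p b) = pvRed (pvVec p t) ∧
        pvN2 (pvVec p b) ≤ pvN2 (pvVec p t))) := by
  have hbase : pvIsBetween p t b = true ↔
      (pvCross (pvVec p t) (pvVec p b) = 0 ∧
       0 ≤ pvDot (pvVec p t) (pvVec p b) ∧
       pvDot (pvVec p t) (pvVec p b) ≤ pvDot (pvVec p t) (pvVec p t)) := by
    unfold pvIsBetween
    rw [pvDiff_eq t p ht hp, pvDiff_eq b p hb hp]
    by_cases h1 : pvCross (pvVec p t) (pvVec p b) ≠ 0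
    · rw [if_pos h1]
      simp only [Bool.false_eq_true, false_iff]
      tauto
    · rw [if_neg h1]
      push_neg at h1
      by_cases h2 : pvDot (pvVec p t) (pvVec p b) < 0 ∨
          pvDot (pvVec p t) (pvVec p b) > pvDot (pvVec p t) (pvVec p t)
      · rw [if_pos h2]
        simp only [Bool.false_eq_true, false_iff]
        rintro ⟨_, h3, h4⟩
        rcases h2 with h | h <;> linarith
      · rw [if_neg h2]
        push_neg at h2
        simp only [true_iff]
        exact ⟨h1, h2.1, h2.2⟩
  rw [hbase]
  by_cases hw : pvVec p b = (0, 0)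
  · constructor
    · intro _; exact Or.inl hw
    · intro _
      rw [hw]
      refine ⟨by simp [pvCross], by simp [pvDot], ?_⟩
      have : 0 ≤ pvN2 (pvVec p t) := (pvN2_pos _ hu).le
      simpa [pvDot] using this
  · rw [pvBlk (pvVec p t) (pvVec p b) hu hw]
    tauto

-- A's inner loop, structurally
theorem pvCanSee_struct (p t : List Int) (l : List (List Int)) :
    pvCanSee p t l = true ↔ ∀ b ∈ l, b = p ∨ b = t ∨ pvIsBetween p t b = false := by
  induction l with
  | nil => simp [pvCanSee]
  | cons b rest ih =>
    rw [pvCanSee]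
    by_cases hbp : b = p ∨ b = t
    · rw [if_pos hbp, ih]
      constructor
      · intro h b' hb'
        rcases List.mem_cons.mp hb' with rfl | hb'rest
        · tauto
        · exact h b' hb'rest
      · intro h b' hb'; exact h b' (by simp [hb'])
    · rw [if_neg hbp]
      push_neg at hbp
      by_cases hbet : pvIsBetween p t b = true
      · rw [if_pos hbet]
        simp only [Bool.false_eq_true, false_iff]
        intro h
        rcases h b (by simp) with h | h | h
        · exact hbp.1 h
        · exact hbp.2 h
        · rw [hbet] at h; cases h
      · rw [if_neg hbet, ih]
        constructor
        · intro h b' hb'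
          rcases List.mem_cons.mp hb' with rfl | hb'rest
          · exact Or.inr (Or.inr (by simpa using hbet))
          · exact h b' hb'rest
        · intro h b' hb'; exact h b' (by simp [hb'])

-- A's visibility = strict nearest in its direction class
theorem pvVis (p t : List Int) (l : List (List Int)) (hp : 2 ≤ p.length)
    (hl : ∀ r ∈ l, 2 ≤ r.length) (ht : 2 ≤ t.length)
    (hpp : ∀ r ∈ l, pvProj r = pvProj p → r = p) (hu : pvVec p t ≠ (0, 0)) :
    pvCanSee p t l = true ↔
      ∀ b ∈ l, b ≠ t → pvVec p b ≠ (0, 0) → pvRed (pvVec p b) = pvRed (pvVec p t) →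
        pvN2 (pvVec p t) < pvN2 (pvVec p b) := by
  rw [pvCanSee_struct]
  constructor
  · intro h b hb hbt hb0 hbr
    by_contra hlt
    push_neg at hlt
    have hbp : b ≠ p := fun he => hb0 (by rw [he]; exact pvVec_self p)
    rcases h b hb with h' | h' | h'
    · exact hbp h'
    · exact hbt h'
    · rw [(pvIsBetween_iff p t b hp ht (hl b hb) hu).2
        (Or.inr ⟨hb0, hbr, hlt⟩)] at h'
      cases h'
  · intro h b hb
    by_cases hbp : b = p
    · exact Or.inl hbp
    by_cases hbt : b = t
    · exact Or.inr (Or.inl hbt)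
    refine Or.inr (Or.inr ?_)
    by_cases hbet : pvIsBetween p t b = true
    · exfalso
      rcases (pvIsBetween_iff p t b hp ht (hl b hb) hu).1 hbet with h0 | ⟨hb0, hbr, hble⟩
      · exact hbp (hpp b hb ((pvVec_zero_iff p b).mp h0))
      · exact absurd hble (not_le.mpr (h b hb hbt hb0 hbr))
    · simpa using hbet

-- A's counting fold is the length of the filtered list
theorem pvFoldCount (p : List Int) (data l : List (List Int)) (c : Int) :
    l.foldl (fun c t => if t = p then c else if pvCanSee p t data then c + 1 else c) c
      = c + ((l.filter (fun t => decide (t ≠ p) && pvCanSee p t data)).length : Int) := by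
  induction l generalizing c with
  | nil => simp
  | cons t l ih =>
    rw [List.foldl_cons, ih]
    by_cases htp : t = p
    · simp [htp]
    · by_cases hsee : pvCanSee p t data = true
      · simp [htp, hsee, List.filter_cons]
        ring
      · simp [htp, hsee, List.filter_cons]

-- B's loop body, coordinates resolved (rows of length 2)
theorem pvDirStep_eq (p t : List Int) (hp : 2 ≤ p.length) (ht : 2 ≤ t.length)
    (s : PySem.Set (Int × Int)) :
    pvDirStep (p.getD 0 0) (p.getD 1 0) s t =
      if pvVec p t = (0, 0) then s else PySem.Set.add s (pvRed (pvVec p t)) := by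
  unfold pvDirStep
  simp only [pvPy0 t ht, pvPy1 t ht]
  by_cases hv : pvVec p t = (0, 0)
  · have hc : t.getD 0 0 - p.getD 0 0 = 0 ∧ t.getD 1 0 - p.getD 1 0 = 0 := by
      rw [Prod.ext_iff] at hv; exact ⟨hv.1, hv.2⟩
    rw [if_pos hc, if_pos hv]
  · have hc : ¬(t.getD 0 0 - p.getD 0 0 = 0 ∧ t.getD 1 0 - p.getD 1 0 = 0) := by
      intro h; exact hv (by rw [pvVec, Prod.ext_iff]; exact ⟨h.1, h.2⟩)
    rw [if_neg hc, if_neg hv]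
    rw [pvRedFloor (t.getD 0 0 - p.getD 0 0) (t.getD 1 0 - p.getD 1 0) hc]
    rfl

theorem pvFoldDirNodup (p : List Int) (hp : 2 ≤ p.length) (l : List (List Int))
    (hl : ∀ r ∈ l, 2 ≤ r.length) (s : PySem.Set (Int × Int)) (hs : s.Nodup) :
    (l.foldl (pvDirStep (p.getD 0 0) (p.getD 1 0)) s).Nodup := by
  induction l generalizing s with
  | nil => exact hs
  | cons t l ih =>
    rw [List.foldl_cons, pvDirStep_eq p t hp (hl t (by simp)) s]
    refine ih (fun r hr => hl r (by simp [hr])) _ ?_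
    split_ifs
    · exact hs
    · exact PySem.Set.nodup_add _ _ hs

theorem pvFoldDirMem (p : List Int) (hp : 2 ≤ p.length) (l : List (List Int))
    (hl : ∀ r ∈ l, 2 ≤ r.length) (s : PySem.Set (Int × Int)) (k : Int × Int) :
    k ∈ l.foldl (pvDirStep (p.getD 0 0) (p.getD 1 0)) s ↔
      k ∈ s ∨ ∃ t ∈ l, pvVec p t ≠ (0, 0) ∧ pvRed (pvVec p t) = k := by
  induction l generalizing s with
  | nil => simp
  | cons t l ih =>
    rw [List.foldl_cons, pvDirStep_eq p t hp (hl t (by simp)) s,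
      ih (fun r hr => hl r (by simp [hr]))]
    by_cases hv : pvVec p t = (0, 0)
    · rw [if_pos hv]
      constructor
      · rintro (h | ⟨b, hb, hb0, hbr⟩)
        · exact Or.inl h
        · exact Or.inr ⟨b, by simp [hb], hb0, hbr⟩
      · rintro (h | ⟨b, hb, hb0, hbr⟩)
        · exact Or.inl h
        · rcases List.mem_cons.mp hb with rfl | hbl
          · exact absurd hv hb0
          · exact Or.inr ⟨b, hbl, hb0, hbr⟩
    · rw [if_neg hv]
      constructor
      · rintro (h | ⟨b, hb, hb0, hbr⟩)
        · rcases (PySem.Set.mem_add _ _ _).mp h with h | h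
          · exact Or.inl h
          · exact Or.inr ⟨t, by simp, hv, h.symm⟩
        · exact Or.inr ⟨b, by simp [hb], hb0, hbr⟩
      · rintro (h | ⟨b, hb, hb0, hbr⟩)
        · exact Or.inl ((PySem.Set.mem_add _ _ _).mpr (Or.inl h))
        · rcases List.mem_cons.mp hb with rfl | hbl
          · exact Or.inl ((PySem.Set.mem_add _ _ _).mpr (Or.inr hbr.symm))
          · exact Or.inr ⟨b, hbl, hb0, hbr⟩

-- a nonempty list has an element minimizing f
theorem pvExistsMin {α : Type} (f : α → Int) (l : List α) (h : l ≠ []) :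
    ∃ m ∈ l, ∀ b ∈ l, f m ≤ f b := by
  induction l with
  | nil => exact absurd rfl h
  | cons a l ih =>
    cases l with
    | nil => exact ⟨a, by simp⟩
    | cons a' l' =>
      obtain ⟨m, hm, hmin⟩ := ih (by simp)
      by_cases hle : f a ≤ f m
      · refine ⟨a, by simp, ?_⟩
        intro b hb
        rcases List.mem_cons.mp hb with rfl | hb
        · exact le_refl _
        · exact le_trans hle (hmin b hb)
      · refine ⟨m, by simp [hm], ?_⟩
        intro b hb
        rcases List.mem_cons.mp hb with rfl | hb
        · exact le_of_not_ge hle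
        · exact hmin b hb

-- every occupied direction has a visible asteroid
theorem pvVisSurj (p : List Int) (data : List (List Int)) (hp : 2 ≤ p.length)
    (hl : ∀ r ∈ data, 2 ≤ r.length) (hproj : (data.map pvProj).Nodup)
    (hpp : ∀ r ∈ data, pvProj r = pvProj p → r = p) (k : Int × Int)
    (h : ∃ t ∈ data, pvVec p t ≠ (0, 0) ∧ pvRed (pvVec p t) = k) :
    ∃ t ∈ data, (t ≠ p ∧ pvCanSee p t data = true) ∧ pvRed (pvVec p t) = k := by
  obtain ⟨t0, ht0, ht00, ht0r⟩ := h
  set cls := data.filter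
    (fun b => decide (pvVec p b ≠ (0, 0) ∧ pvRed (pvVec p b) = k)) with hcls
  have ht0c : t0 ∈ cls := by
    rw [hcls, List.mem_filter]
    exact ⟨ht0, by simp [ht00, ht0r]⟩
  obtain ⟨m, hm, hmin⟩ := pvExistsMin (fun b => pvN2 (pvVec p b)) cls
    (by intro he; rw [he] at ht0c; cases ht0c)
  have hmc := (List.mem_filter.mp (hcls ▸ hm))
  have hmd : m ∈ data := hmc.1
  have hm0 : pvVec p m ≠ (0, 0) ∧ pvRed (pvVec p m) = k := by
    have := hmc.2; simpa using this
  refine ⟨m, hmd, ⟨?_, ?_⟩, hm0.2⟩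
  · intro he
    exact hm0.1 (by rw [he]; exact pvVec_self p)
  · rw [pvVis p m data hp hl (hl m hmd) hpp hm0.1]
    intro b hb hbm hb0 hbr
    have hbc : b ∈ cls := by
      rw [hcls, List.mem_filter]
      exact ⟨hb, by simp [hb0, hbr ▸ hm0.2, hbr, hm0.2]⟩
    have hle := hmin b hbc
    rcases lt_or_eq_of_le hle with hlt | heq
    · exact hlt
    · exfalso
      have hveq : pvVec p b = pvVec p m :=
        pvEqOfRedN2 _ _ hm0.1 hb0 (by rw [hbr, hm0.2]) heq.symm
      exact hbm (List.inj_on_of_nodup_map hproj hb hmd (pvVec_inj_proj p m b hveq))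

-- ===== VERDICT (by name: the statement is the Claim_ definition above) =====
theorem countViewable_spec : Claim_equal_countViewable := by
  intro p data _hdom hpre
  obtain ⟨hp, hdata, hproj, hpp⟩ := hpre
  have hnd : data.Nodup := hproj.of_map
  unfold Spec_countViewable countViewable countViewable_alt
  rw [pvPy0 p hp, pvPy1 p hp, pvFoldCount p data data 0, zero_add]
  set vis := data.filter (fun t => decide (t ≠ p) && pvCanSee p t data) with hvis
  set dirs := data.foldl (pvDirStep (p.getD 0 0) (p.getD 1 0)) PySem.Set.empty with hdirs
  have hmapnd : (vis.map (fun t => pvRed (pvVec p t))).Nodup := by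
    refine List.Nodup.map_on ?_ (hnd.filter _)
    intro x hx y hy hxy
    have hxf := List.mem_filter.mp (hvis ▸ hx)
    have hyf := List.mem_filter.mp (hvis ▸ hy)
    have hxp : x ≠ p := by have := hxf.2; simp at this; exact this.1
    have hyp : y ≠ p := by have := hyf.2; simp at this; exact this.1
    have hxs : pvCanSee p x data = true := by have := hxf.2; simp at this; exact this.2
    have hys : pvCanSee p y data = true := by have := hyf.2; simp at this; exact this.2
    have hx0 : pvVec p x ≠ (0, 0) := fun h =>
      hxp (hpp x hxf.1 ((pvVec_zero_iff p x).mp h))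
    have hy0 : pvVec p y ≠ (0, 0) := fun h =>
      hyp (hpp y hyf.1 ((pvVec_zero_iff p y).mp h))
    by_contra hne
    have h1 := (pvVis p x data hp hdata (hdata x hxf.1) hpp hx0).1 hxs
      y hyf.1 (fun h => hne h.symm) hy0 hxy.symm
    have h2 := (pvVis p y data hp hdata (hdata y hyf.1) hpp hy0).1 hys
      x hxf.1 hne hx0 hxy
    exact absurd (lt_trans h1 h2) (lt_irrefl _)
  have hdnd : dirs.Nodup := hdirs ▸ pvFoldDirNodup p hp data hdata _ List.nodup_nil
  have hmem : ∀ k, k ∈ vis.map (fun t => pvRed (pvVec p t)) ↔ k ∈ dirs := by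
    intro k
    rw [hdirs, pvFoldDirMem p hp data hdata]
    simp only [List.mem_map, PySem.Set.empty, List.not_mem_nil, false_or]
    constructor
    · rintro ⟨t, ht, rfl⟩
      have htf := List.mem_filter.mp (hvis ▸ ht)
      have htp : t ≠ p := by have := htf.2; simp at this; exact this.1
      exact ⟨t, htf.1, fun h => htp (hpp t htf.1 ((pvVec_zero_iff p t).mp h)), rfl⟩
    · intro h
      obtain ⟨t, ht, ⟨htp, hts⟩, htr⟩ := pvVisSurj p data hp hdata hproj hpp k h
      refine ⟨t, ?_, htr⟩
      rw [hvis, List.mem_filter]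
      exact ⟨ht, by simp [htp, hts]⟩
  have hperm : (vis.map (fun t => pvRed (pvVec p t))).Perm dirs :=
    (List.perm_ext_iff_of_nodup hmapnd hdnd).mpr hmem
  have hlen : vis.length = dirs.length :=
    (List.length_map (fun t => pvRed (pvVec p t))).symm.trans hperm.length_eq
  rw [hlen]
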